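-- pv_equiv track=rewrite | github.com/neekitochka/SIAODLABS | zadachi.py | conca
-- ===== SOURCE A (Python) =====
-- def conca(s):
--     result = set()
--     for l in range(1, len(s)//2+1):
--         count = sum(s[i] == s[i+l] for i in range(l))
--         for i in range(len(s)-2*l):
--             if count == l:
--                 result.add(s[i:i+l])
--             count += (s[i+l] == s[i+l+l]) - (s[i] == s[i+l])
--         if count == l:
--             result.add(s[len(s)-2*l:len(s)-2*l+l])
--     return len(result)
-- ===== SOURCE B (Python) =====
-- def conca(s):
--     n = len(s)
--     seen = set()
--     for l in range(1, n // 2 + 1):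
--         for i in range(n - 2 * l + 1):
--             w = s[i:i + l]
--             if s.startswith(w, i + l):
--                 seen.add(w)
--     return len(seen)
-- ===== Notes on version B (the rewrite author's own statement) =====
-- stated objective: simpler
-- what changed: replaces A's per-length sliding match-counter (initial sum plus incremental +/- updates and a separate final check after the loop) with one uniform loop that directly tests whether the window s[i:i+l] repeats at i+l via str.startswith
import Mathlib
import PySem

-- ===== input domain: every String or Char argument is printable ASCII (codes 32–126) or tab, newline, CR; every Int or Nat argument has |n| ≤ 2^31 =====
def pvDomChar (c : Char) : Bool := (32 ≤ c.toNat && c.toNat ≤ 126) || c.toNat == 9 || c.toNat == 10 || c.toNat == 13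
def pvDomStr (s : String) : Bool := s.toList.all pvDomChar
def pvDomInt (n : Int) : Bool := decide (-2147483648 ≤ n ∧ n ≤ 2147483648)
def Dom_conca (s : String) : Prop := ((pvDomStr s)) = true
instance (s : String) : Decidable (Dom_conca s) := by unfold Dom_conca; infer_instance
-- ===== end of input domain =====

-- B replaces A's per-length sliding match-counter (initial sum + incremental updates +
-- a separate final check) with one uniform loop comparing the two adjacent slices directly;
-- objective: simpler. Equal return value proved on all inputs (both programs are total).

-- ===== PORT A =====
-- The set holds the slices as List Char (Python: str); only its size is returned.
def conca (s : String) : Int :=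
  let cs := s.toList
  let n : Int := (cs.length : Int)
  let result : PySem.Set (List Char) :=
    (PySem.List.pyRange 1 (PySem.Int.floordiv n 2 + 1) 1).foldl (fun result l =>
      -- count = sum(s[i] == s[i+l] for i in range(l))
      let count0 : Int := ((PySem.List.pyRange 0 l 1).map
          (fun i => if PySem.List.pyGet? cs i == PySem.List.pyGet? cs (i + l) then (1 : Int) else 0)).sum
      let st :=
        (PySem.List.pyRange 0 (n - 2 * l) 1).foldl
          (fun (st : PySem.Set (List Char) × Int) i =>
            let r := if st.2 == l then
                PySem.Set.add st.1 (PySem.List.slice cs (some i) (some (i + l)))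
              else st.1
            (r, st.2 + (if PySem.List.pyGet? cs (i + l) == PySem.List.pyGet? cs (i + l + l) then (1 : Int) else 0)
                     - (if PySem.List.pyGet? cs i == PySem.List.pyGet? cs (i + l) then (1 : Int) else 0)))
          (result, count0)
      if st.2 == l then
        PySem.Set.add st.1 (PySem.List.slice cs (some (n - 2 * l)) (some (n - 2 * l + l)))
      else st.1)
      PySem.Set.empty
  (result.length : Int)

-- ===== PORT B =====
def conca_alt (s : String) : Int :=
  let cs := s.toList
  let n : Int := (cs.length : Int)
  let seen : PySem.Set (List Char) :=
    (PySem.List.pyRange 1 (PySem.Int.floordiv n 2 + 1) 1).foldl (fun seen l =>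
      (PySem.List.pyRange 0 (n - 2 * l + 1) 1).foldl (fun seen i =>
        let w := PySem.List.slice cs (some i) (some (i + l))
        -- s.startswith(w, i+l) with 0 ≤ i+l is s[i+l:].startswith(w): exact
        if PySem.Chars.startswith (PySem.List.slice cs (some (i + l)) none) w then
          PySem.Set.add seen w
        else seen) seen)
      PySem.Set.empty
  (seen.length : Int)

-- ===== PRECONDITION & SPEC =====
def Spec_conca (s : String) (out : Int) : Prop := out = conca_alt s
instance (s : String) (out : Int) : Decidable (Spec_conca s out) := by unfold Spec_conca; infer_instance

-- ===== CLAIM (what is proved, stated in full; the proofs are below) =====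
def Claim_equal_conca : Prop := ∀ (s : String), Dom_conca s → Spec_conca s (conca s)

-- ===== LEMMAS AND PROOFS =====

-- indicator of a match at offset j (distance l)
def pvInd (cs : List Char) (l j : Int) : Int :=
  if PySem.List.pyGet? cs j == PySem.List.pyGet? cs (j + l) then 1 else 0

-- A's running count at window start i
def pvCnt (cs : List Char) (l i : Int) : Int :=
  ((PySem.List.pyRange i (i + l) 1).map (pvInd cs l)).sum

lemma pvCnt_step (cs : List Char) (l i : Int) (hl : 1 ≤ l) :
    pvCnt cs l (i + 1) = pvCnt cs l i + pvInd cs l (i + l) - pvInd cs l i := by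
  unfold pvCnt
  rw [PySem.List.pyRange_one_cons (by omega : i < i + l)]
  have h : i + 1 + l = (i + l) + 1 := by ring
  rw [h, PySem.List.pyRange_one_succ_right (by omega : i + 1 ≤ i + l)]
  simp [List.sum_append]
  ring

-- windows of u at a and b of length L are equal iff all positions agree
lemma pvWindows_eq_iff (u : List Char) (a b L : Nat) :
    ((u.drop a).take L = (u.drop b).take L) ↔ ∀ k, k < L → u[a + k]? = u[b + k]? := by
  constructor
  · intro h k hk
    have := congrArg (fun t => t[k]?) h
    simpa [List.getElem?_take, List.getElem?_drop, hk] using this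
  · intro h
    apply List.ext_getElem?
    intro k
    by_cases hk : k < L
    · simpa [List.getElem?_take, List.getElem?_drop, hk] using h k hk
    · simp [hk]

-- the heart: A's count test equals B's slice test, on in-range windows
lemma pvTest_eq (cs : List Char) (l i : Int) (hl : 1 ≤ l) (hi : 0 ≤ i)
    (hin : i + 2 * l ≤ (cs.length : Int)) :
    (pvCnt cs l i == l) =
      PySem.Chars.startswith (PySem.List.slice cs (some (i + l)) none)
        (PySem.List.slice cs (some i) (some (i + l))) := by
  obtain ⟨a, rfl⟩ := Int.eq_ofNat_of_zero_le hi
  obtain ⟨L, rfl⟩ := Int.eq_ofNat_of_zero_le (le_trans zero_le_one hl)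
  have hs1 : PySem.List.slice cs (some (a : Int)) (some ((a : Int) + (L : Int)))
      = (cs.drop a).take L := PySem.List.slice_natCast_add cs a L
  have hs2 : PySem.List.slice cs (some ((a : Int) + (L : Int))) none = cs.drop (a + L) := by
    rw [show ((a : Int) + (L : Int)) = ((a + L : Nat) : Int) by push_cast; ring]
    exact PySem.List.slice_from_natCast cs (a + L)
  have hc : pvCnt cs (L : Int) (a : Int) = ((List.range L).countP
      (fun k => PySem.List.pyGet? cs ((a + k : Nat) : Int) == PySem.List.pyGet? cs ((a + L + k : Nat) : Int)) : Int) := by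
    unfold pvCnt
    rw [PySem.List.pyRange_one, show (((a : Int) + (L : Int) - (a : Int))).toNat = L by omega,
        List.map_map,
        ← PySem.List.sum_map_ite_one_zero
          (fun k => PySem.List.pyGet? cs ((a + k : Nat) : Int) == PySem.List.pyGet? cs ((a + L + k : Nat) : Int))
          (List.range L)]
    congr 1
    apply List.map_congr_left
    intro k _
    simp only [Function.comp_apply, pvInd]
    rw [show ((a : Int) + (k : Nat)) = ((a + k : Nat) : Int) by push_cast; ring,
        show (((a + k : Nat) : Int) + (L : Int)) = ((a + L + k : Nat) : Int) by push_cast; ring]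
  have hlen : ((cs.drop a).take L).length = L := by
    simp; omega
  rw [hc, hs1, hs2, Bool.eq_iff_iff, PySem.Chars.startswith_iff, List.prefix_iff_eq_take, hlen]
  simp only [beq_iff_eq]
  rw [show ((cs.drop a).take L = ((cs.drop (a + L)).take L)) ↔
        ∀ k, k < L → cs[a + k]? = cs[(a + L) + k]? from pvWindows_eq_iff cs a (a + L) L]
  constructor
  · intro h k hk
    have hcp : (List.range L).countP
        (fun k => PySem.List.pyGet? cs ((a + k : Nat) : Int) == PySem.List.pyGet? cs ((a + L + k : Nat) : Int)) = L := by
      exact_mod_cast h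
    have hp : (PySem.List.pyGet? cs ((a + k : Nat) : Int) == PySem.List.pyGet? cs ((a + L + k : Nat) : Int)) = true :=
      List.countP_eq_length.mp (by rw [List.length_range]; exact hcp) k (List.mem_range.mpr hk)
    rw [beq_iff_eq, PySem.List.pyGet?_natCast, PySem.List.pyGet?_natCast] at hp
    exact hp
  · intro h
    have hall : ∀ k ∈ List.range L, (fun k => PySem.List.pyGet? cs ((a + k : Nat) : Int)
        == PySem.List.pyGet? cs ((a + L + k : Nat) : Int)) k = true := by
      intro k hk
      show (PySem.List.pyGet? cs ((a + k : Nat) : Int) == PySem.List.pyGet? cs ((a + L + k : Nat) : Int)) = true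
      rw [beq_iff_eq, PySem.List.pyGet?_natCast, PySem.List.pyGet?_natCast]
      exact h k (List.mem_range.mp hk)
    have := List.countP_eq_length.mpr hall
    rw [List.length_range] at this
    exact_mod_cast this

-- A's per-l inner fold, with the count tracking the window sum
lemma pvFoldA (cs : List Char) (l : Int) (hl : 1 ≤ l) :
    ∀ (m a : Int) (R : PySem.Set (List Char)), a ≤ m →
    (PySem.List.pyRange a m 1).foldl
        (fun (st : PySem.Set (List Char) × Int) i =>
          ((if st.2 == l then PySem.Set.add st.1 (PySem.List.slice cs (some i) (some (i + l))) else st.1),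
            st.2 + (if PySem.List.pyGet? cs (i + l) == PySem.List.pyGet? cs (i + l + l) then (1:Int) else 0)
                 - (if PySem.List.pyGet? cs i == PySem.List.pyGet? cs (i + l) then (1:Int) else 0)))
        (R, pvCnt cs l a)
      = ((PySem.List.pyRange a m 1).foldl
          (fun r i => if pvCnt cs l i == l then
              PySem.Set.add r (PySem.List.slice cs (some i) (some (i + l))) else r) R,
         pvCnt cs l m) := by
  intro m
  have key : ∀ (d : Nat) (a : Int) (R : PySem.Set (List Char)), m - a ≤ (d : Int) → a ≤ m →
      (PySem.List.pyRange a m 1).foldl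
        (fun (st : PySem.Set (List Char) × Int) i =>
          ((if st.2 == l then PySem.Set.add st.1 (PySem.List.slice cs (some i) (some (i + l))) else st.1),
            st.2 + (if PySem.List.pyGet? cs (i + l) == PySem.List.pyGet? cs (i + l + l) then (1:Int) else 0)
                 - (if PySem.List.pyGet? cs i == PySem.List.pyGet? cs (i + l) then (1:Int) else 0)))
        (R, pvCnt cs l a)
      = ((PySem.List.pyRange a m 1).foldl
          (fun r i => if pvCnt cs l i == l then
              PySem.Set.add r (PySem.List.slice cs (some i) (some (i + l))) else r) R,
         pvCnt cs l m) := by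
    intro d
    induction d with
    | zero =>
      intro a R hd ham
      have : m = a := by omega
      subst this
      rw [PySem.List.pyRange_one_eq_nil (le_refl m)]
      simp
    | succ d ih =>
      intro a R hd ham
      by_cases hma : a = m
      · subst hma
        rw [PySem.List.pyRange_one_eq_nil (le_refl a)]
        simp
      · rw [PySem.List.pyRange_one_cons (by omega : a < m)]
        simp only [List.foldl_cons]
        have hstep : pvCnt cs l a
            + (if PySem.List.pyGet? cs (a + l) == PySem.List.pyGet? cs (a + l + l) then (1:Int) else 0)
            - (if PySem.List.pyGet? cs a == PySem.List.pyGet? cs (a + l) then (1:Int) else 0)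
            = pvCnt cs l (a + 1) := by
          rw [pvCnt_step cs l a hl]
          unfold pvInd
          ring
        rw [hstep]
        exact ih (a + 1) _ (by omega) (by omega)
  intro a R ham
  exact key (m - a).toNat a R (by omega) ham

-- the per-l steps of A and B agree, for every admitted l
lemma pvStep_eq (cs : List Char) (l : Int) (hl : 1 ≤ l)
    (hn : 2 * l ≤ (cs.length : Int)) (R : PySem.Set (List Char)) :
    (let n : Int := (cs.length : Int)
     let count0 : Int := ((PySem.List.pyRange 0 l 1).map
        (fun i => if PySem.List.pyGet? cs i == PySem.List.pyGet? cs (i + l) then (1 : Int) else 0)).sum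
     let st :=
      (PySem.List.pyRange 0 (n - 2 * l) 1).foldl
        (fun (st : PySem.Set (List Char) × Int) i =>
          ((if st.2 == l then PySem.Set.add st.1 (PySem.List.slice cs (some i) (some (i + l))) else st.1),
            st.2 + (if PySem.List.pyGet? cs (i + l) == PySem.List.pyGet? cs (i + l + l) then (1:Int) else 0)
                 - (if PySem.List.pyGet? cs i == PySem.List.pyGet? cs (i + l) then (1:Int) else 0)))
        (R, count0)
     if st.2 == l then
       PySem.Set.add st.1 (PySem.List.slice cs (some (n - 2 * l)) (some (n - 2 * l + l)))
     else st.1)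
    = (PySem.List.pyRange 0 ((cs.length : Int) - 2 * l + 1) 1).foldl (fun seen i =>
        let w := PySem.List.slice cs (some i) (some (i + l))
        if PySem.Chars.startswith (PySem.List.slice cs (some (i + l)) none) w then
          PySem.Set.add seen w
        else seen) R := by
  set n : Int := (cs.length : Int) with hndef
  have hc0 : ((PySem.List.pyRange 0 l 1).map
      (fun i => if PySem.List.pyGet? cs i == PySem.List.pyGet? cs (i + l) then (1 : Int) else 0)).sum
      = pvCnt cs l 0 := by
    unfold pvCnt pvInd
    simp
  simp only [hc0]
  rw [pvFoldA cs l hl (n - 2 * l) 0 R (by omega)]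
  dsimp only
  -- fold the epilogue into the range
  rw [PySem.List.pyRange_one_succ_right (by omega : (0:Int) ≤ n - 2 * l)]
  rw [List.foldl_append]
  simp only [List.foldl_cons, List.foldl_nil]
  -- align both folds (same range pyRange 0 (n-2l) plus last element n-2l)
  have hcong : (PySem.List.pyRange 0 (n - 2 * l) 1).foldl
      (fun r i => if pvCnt cs l i == l then
          PySem.Set.add r (PySem.List.slice cs (some i) (some (i + l))) else r) R
      = (PySem.List.pyRange 0 (n - 2 * l) 1).foldl (fun seen i =>
          let w := PySem.List.slice cs (some i) (some (i + l))
          if PySem.Chars.startswith (PySem.List.slice cs (some (i + l)) none) w then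
            PySem.Set.add seen w
          else seen) R := by
    apply PySem.List.foldl_congr_mem
    intro acc x hx
    rw [PySem.List.mem_pyRange_one] at hx
    rw [pvTest_eq cs l x hl hx.1 (by omega)]
  rw [hcong, pvTest_eq cs l (n - 2 * l) hl (by omega) (by omega)]

-- ===== VERDICT (by name: the statement is the Claim_ definition above) =====
theorem conca_spec : Claim_equal_conca := by
  intro s _
  unfold Spec_conca conca conca_alt
  simp only []
  congr 2
  apply PySem.List.foldl_congr_mem
  intro acc l hl
  rw [PySem.List.mem_pyRange_one] at hl
  have h2 : PySem.Int.floordiv ((s.toList.length : Int)) 2 = (s.toList.length : Int) / 2 := by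
    exact PySem.Int.floordiv_eq_ediv_of_pos (by omega)
  have hl1 : 1 ≤ l := hl.1
  have hll : 2 * l ≤ (s.toList.length : Int) := by
    have := hl.2
    rw [h2] at this
    omega
  exact pvStep_eq s.toList l hl1 hll acc
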